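-- pv_equiv track=rewrite | github.com/Glidepath25/geoprox-api | geoprox/core.py | compute_outcome
-- ===== SOURCE A (Python) =====
-- from typing import Optional, List, Tuple, Dict, Any
--
-- def compute_outcome(summary_bins: Dict[str, Dict[str, int]]) -> str:
--     """HIGH if any category has <10 m, MEDIUM if any 10-25 m, else LOW."""
--     has10 = any(b.get("<10m", 0) > 0 for b in summary_bins.values())
--     if has10:
--         return "HIGH"
--     has25 = any(b.get("10-25m", 0) > 0 for b in summary_bins.values())
--     if has25:
--         return "MEDIUM"
--     return "LOW"
-- ===== SOURCE B (Python) =====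
-- def compute_outcome(summary_bins):
--     """HIGH if any category has <10 m, MEDIUM if any 10-25 m, else LOW."""
--     levels = ("LOW", "MEDIUM", "HIGH")
--     score = max((2 if b.get("<10m", 0) > 0 else 1 if b.get("10-25m", 0) > 0 else 0
--                  for b in summary_bins.values()), default=0)
--     return levels[score]
-- ===== Notes on version B (the rewrite author's own statement) =====
-- stated objective: alternative
-- what changed: Replaces A's two staged boolean any() scans with a single max-reduction: each bin is mapped to a numeric severity rank (2/1/0) and the overall maximum indexes a level table, removing the flag/branch structure entirely.
import Mathlib
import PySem

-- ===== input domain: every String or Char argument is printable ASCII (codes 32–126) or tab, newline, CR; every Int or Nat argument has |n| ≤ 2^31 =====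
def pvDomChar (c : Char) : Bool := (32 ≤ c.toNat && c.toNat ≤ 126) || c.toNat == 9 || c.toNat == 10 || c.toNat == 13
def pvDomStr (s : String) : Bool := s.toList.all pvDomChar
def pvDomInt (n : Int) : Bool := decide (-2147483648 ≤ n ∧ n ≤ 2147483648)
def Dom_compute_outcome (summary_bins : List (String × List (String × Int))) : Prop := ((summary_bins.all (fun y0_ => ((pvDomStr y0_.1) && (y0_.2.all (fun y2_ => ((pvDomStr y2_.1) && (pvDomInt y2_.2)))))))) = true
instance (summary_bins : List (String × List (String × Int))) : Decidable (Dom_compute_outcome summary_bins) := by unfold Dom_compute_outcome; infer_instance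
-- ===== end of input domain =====

-- B maps each bin to a numeric severity rank (2/1/0), takes the max over all bins, and indexes a level table; same O(n) cost, a different (max-reduction) decomposition of the same classification.


-- ===== PORT A =====
def compute_outcome (summary_bins : List (String × List (String × Int))) : String :=
  let has10 := (PySem.Dict.values (PySem.Dict.mk summary_bins)).any
    (fun b => decide (0 < PySem.Dict.getD (PySem.Dict.mk b) "<10m" 0))
  if has10 then "HIGH"
  else
    let has25 := (PySem.Dict.values (PySem.Dict.mk summary_bins)).any
      (fun b => decide (0 < PySem.Dict.getD (PySem.Dict.mk b) "10-25m" 0))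
    if has25 then "MEDIUM" else "LOW"

-- ===== PORT B =====
-- per-bin severity rank: 2 if '<10m' count positive, 1 if '10-25m' positive, else 0
def pvBinRank (b : List (String × Int)) : Int :=
  if 0 < PySem.Dict.getD (PySem.Dict.mk b) "<10m" 0 then 2
  else if 0 < PySem.Dict.getD (PySem.Dict.mk b) "10-25m" 0 then 1 else 0

def compute_outcome_alt (summary_bins : List (String × List (String × Int))) : String :=
  let levels : List String := ["LOW", "MEDIUM", "HIGH"]
  -- max(generator, default=0): running max over the ranks, starting from the default 0
  let score := (PySem.Dict.values (PySem.Dict.mk summary_bins)).foldl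
    (fun m b => max m (pvBinRank b)) 0
  (PySem.List.pyGet? levels score).getD ""

-- ===== PRECONDITION & SPEC =====
def Spec_compute_outcome (summary_bins : List (String × List (String × Int))) (out : String) : Prop := out = compute_outcome_alt summary_bins
instance (summary_bins : List (String × List (String × Int))) (out : String) : Decidable (Spec_compute_outcome summary_bins out) := by unfold Spec_compute_outcome; infer_instance

-- ===== CLAIM (what is proved, stated in full; the proofs are below) =====
def Claim_equal_compute_outcome : Prop := ∀ (summary_bins : List (String × List (String × Int))), Dom_compute_outcome summary_bins → Spec_compute_outcome summary_bins (compute_outcome summary_bins)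

-- ===== LEMMAS AND PROOFS =====

theorem rank_foldl (l : List (List (String × Int))) (m : Int) (hm : 0 ≤ m) :
    l.foldl (fun m b => max m (pvBinRank b)) m
    = max m (if l.any (fun b => decide (0 < PySem.Dict.getD (PySem.Dict.mk b) "<10m" 0)) then 2
             else if l.any (fun b => decide (0 < PySem.Dict.getD (PySem.Dict.mk b) "10-25m" 0)) then 1
             else 0) := by
  induction l generalizing m with
  | nil => simp; omega
  | cons b t ih =>
    simp only [List.foldl_cons, List.any_cons]
    rw [ih (max m (pvBinRank b)) (le_max_of_le_left hm)]
    unfold pvBinRank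
    by_cases hb1 : 0 < PySem.Dict.getD (PySem.Dict.mk b) "<10m" 0 <;>
    by_cases hb2 : 0 < PySem.Dict.getD (PySem.Dict.mk b) "10-25m" 0 <;>
    by_cases ht1 : t.any (fun b => decide (0 < PySem.Dict.getD (PySem.Dict.mk b) "<10m" 0)) = true <;>
    by_cases ht2 : t.any (fun b => decide (0 < PySem.Dict.getD (PySem.Dict.mk b) "10-25m" 0)) = true <;>
    simp [hb1, hb2, ht1, ht2]

-- ===== VERDICT (by name: the statement is the Claim_ definition above) =====
theorem compute_outcome_spec : Claim_equal_compute_outcome := by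
  intro summary_bins _
  unfold Spec_compute_outcome compute_outcome compute_outcome_alt
  rw [rank_foldl _ 0 le_rfl]
  split_ifs with h1 h2
  · simp only [h1, if_true]
    decide
  · simp only [h1, h2, if_true, Bool.false_eq_true, if_false]
    decide
  · simp only [h1, h2, Bool.false_eq_true, if_false]
    decide
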